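-- pv_equiv track=rewrite | github.com/ixor911/LeetCode_Python | 2070.py | maximumBeauty
-- ===== SOURCE A (Python) =====
-- def maximumBeauty(items: list[list[int]], queries: list[int]) -> list[int]:
--     d = {}
--
--     for query in queries:
--         d[query] = 0
--
--     for item in items:
--         suits = [query for query in queries if query >= item[0]]
--         for suit in suits:
--             if d.get(suit) < item[1]:
--                 d[suit] = item[1]
--
--     return [d[query] for query in queries]
-- ===== SOURCE B (Python) =====
-- def maximumBeauty(items: list[list[int]], queries: list[int]) -> list[int]:
--     si = sorted(items, key=lambda it: it[0])
--     prices = [it[0] for it in si]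
--     best = []
--     cur = 0
--     for it in si:
--         if it[1] > cur:
--             cur = it[1]
--         best.append(cur)
--     res = []
--     for q in queries:
--         lo, hi = 0, len(prices)
--         while lo < hi:
--             mid = (lo + hi) // 2
--             if prices[mid] <= q:
--                 lo = mid + 1
--             else:
--                 hi = mid
--         res.append(best[lo - 1] if lo > 0 else 0)
--     return res
-- ===== Notes on version B (the rewrite author's own statement) =====
-- stated objective: faster
-- what changed: A scans all queries for every item (O(n*q) with a dict keyed by query); B sorts items by price, builds a prefix-max beauty array once, and answers each query by binary search, O((n+q) log n).
-- outside the precondition, e.g. on maximumBeauty([[5]], [1]): A returns [0], B raises IndexError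
import Mathlib
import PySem

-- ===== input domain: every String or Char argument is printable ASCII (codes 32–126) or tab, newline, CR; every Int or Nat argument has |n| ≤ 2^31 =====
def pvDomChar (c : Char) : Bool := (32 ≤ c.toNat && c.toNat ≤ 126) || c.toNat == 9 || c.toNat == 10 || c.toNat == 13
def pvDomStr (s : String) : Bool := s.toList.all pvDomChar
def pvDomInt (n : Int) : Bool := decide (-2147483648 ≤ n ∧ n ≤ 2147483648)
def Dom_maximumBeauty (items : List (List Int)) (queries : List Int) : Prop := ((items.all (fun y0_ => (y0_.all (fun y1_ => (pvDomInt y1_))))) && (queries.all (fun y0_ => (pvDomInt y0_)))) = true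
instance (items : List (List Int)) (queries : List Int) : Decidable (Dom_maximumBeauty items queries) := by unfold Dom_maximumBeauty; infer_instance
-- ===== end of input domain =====

-- B replaces A's per-item scan of all queries by sort + prefix-max + binary search (measured faster, asymptotic change).

-- ===== PORT A =====
-- item[0] / item[1] are ported as pyGetD …; Pre_ excludes the inputs where Python raises IndexError there.
def maximumBeauty (items : List (List Int)) (queries : List Int) : List Int :=
  let d : PySem.Dict Int Int := queries.foldl (fun d q => d.insert q 0) PySem.Dict.empty
  let d := items.foldl (fun d item =>
    let suits := queries.filter (fun q => PySem.List.pyGetD item 0 0 ≤ q)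
    suits.foldl (fun d suit =>
      if d.getD suit 0 < PySem.List.pyGetD item 1 0
      then d.insert suit (PySem.List.pyGetD item 1 0) else d) d) d
  queries.map (fun q => d.getD q 0)

-- ===== PORT B =====
-- the hand-written while-loop binary search of Source B ('lo, hi = 0, len(prices); while lo < hi: …')
def bsLoop (prices : List Int) (q : Int) (lo hi : Nat) : Nat :=
  if lo < hi then
    let mid := (lo + hi) / 2
    if PySem.List.pyGetD prices (mid : Int) 0 ≤ q then bsLoop prices q (mid + 1) hi
    else bsLoop prices q lo mid
  else lo
termination_by hi - lo
decreasing_by all_goals omega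

def maximumBeauty_alt (items : List (List Int)) (queries : List Int) : List Int :=
  let si := PySem.List.sorted items (fun it => PySem.List.pyGetD it 0 0)
  let prices := si.map (fun it => PySem.List.pyGetD it 0 0)
  let best := (si.foldl (fun (p : Int × List Int) it =>
      let cur := if p.1 < PySem.List.pyGetD it 1 0 then PySem.List.pyGetD it 1 0 else p.1
      (cur, p.2 ++ [cur])) ((0 : Int), ([] : List Int))).2
  queries.map (fun q =>
    let lo := bsLoop prices q 0 prices.length
    if lo > 0 then PySem.List.pyGetD best ((lo : Int) - 1) 0 else 0)

-- ===== PRECONDITION & SPEC =====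
-- Pre_ excludes items with fewer than 2 entries: on those A raises IndexError on item[0]/item[1],
-- except the corner where a 1-element item matches no query — there A still returns, but B's
-- sort-based pass reads item[1] of every item and raises (see claim.json "cites").
def Pre_maximumBeauty (items : List (List Int)) (queries : List Int) : Prop :=
  ∀ item ∈ items, 2 ≤ item.length
instance (items : List (List Int)) (queries : List Int) : Decidable (Pre_maximumBeauty items queries) := by
  unfold Pre_maximumBeauty; infer_instance
def pvWitness_maximumBeauty : List (List Int) × List Int := ([[1, 2], [3, 2], [2, 4]], [1, 2, 3, 0])

def Spec_maximumBeauty (items : List (List Int)) (queries : List Int) (out : List Int) : Prop := out = maximumBeauty_alt items queries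
instance (items : List (List Int)) (queries : List Int) (out : List Int) : Decidable (Spec_maximumBeauty items queries out) := by unfold Spec_maximumBeauty; infer_instance

-- ===== CLAIM (what is proved, stated in full; the proofs are below) =====
def Claim_equal_maximumBeauty : Prop := ∀ (items : List (List Int)) (queries : List Int), Dom_maximumBeauty items queries → Pre_maximumBeauty items queries → Spec_maximumBeauty items queries (maximumBeauty items queries)

-- ===== LEMMAS AND PROOFS =====

-- the common value: running max over items of beauty among items with price ≤ q
def pvStep (q : Int) (c : Int) (it : List Int) : Int :=
  if PySem.List.pyGetD it 0 0 ≤ q ∧ c < PySem.List.pyGetD it 1 0 then PySem.List.pyGetD it 1 0 else c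

def pvG (q : Int) (l : List (List Int)) : Int := l.foldl (pvStep q) 0

-- ---------- A side ----------

lemma initD_getD (queries : List Int) (d : PySem.Dict Int Int) (h : ∀ x, d.getD x 0 = 0) (q : Int) :
    (queries.foldl (fun d q => d.insert q 0) d).getD q 0 = 0 := by
  induction queries generalizing d with
  | nil => exact h q
  | cons s t ih =>
      simp only [List.foldl_cons]
      exact ih _ (fun x => by rw [PySem.Dict.getD_insert]; split <;> simp [h])

lemma innerLoop_getD (v : Int) (l : List Int) (d : PySem.Dict Int Int) (q : Int) :
    (l.foldl (fun d s => if d.getD s 0 < v then d.insert s v else d) d).getD q 0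
      = if q ∈ l ∧ d.getD q 0 < v then v else d.getD q 0 := by
  induction l generalizing d with
  | nil => simp
  | cons s t ih =>
      simp only [List.foldl_cons, List.mem_cons]
      by_cases hsq : q = s
      · subst hsq
        by_cases hlt : d.getD q 0 < v
        · rw [if_pos hlt, ih]
          have : (d.insert q v).getD q 0 = v := by rw [PySem.Dict.getD_insert]; simp
          rw [this]; simp [hlt]
        · rw [if_neg hlt, ih]
          by_cases hm : q ∈ t <;> simp [hm, hlt]
      · have hpres : (if d.getD s 0 < v then d.insert s v else d).getD q 0 = d.getD q 0 := by
          split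
          · rw [PySem.Dict.getD_insert]; simp [hsq]
          · rfl
        rw [ih, hpres]
        simp [hsq]

lemma itemLoop_getD (items : List (List Int)) (queries : List Int) (d : PySem.Dict Int Int)
    (q : Int) (hq : q ∈ queries) :
    (items.foldl (fun d item =>
      (queries.filter (fun q => PySem.List.pyGetD item 0 0 ≤ q)).foldl (fun d suit =>
        if d.getD suit 0 < PySem.List.pyGetD item 1 0
        then d.insert suit (PySem.List.pyGetD item 1 0) else d) d) d).getD q 0
    = items.foldl (pvStep q) (d.getD q 0) := by
  induction items generalizing d with
  | nil => rfl
  | cons it t ih =>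
      simp only [List.foldl_cons]
      rw [ih]
      congr 1
      rw [innerLoop_getD]
      simp only [pvStep, List.mem_filter, decide_eq_true_eq]
      by_cases h0 : PySem.List.pyGetD it 0 0 ≤ q <;>
        by_cases h1 : d.getD q 0 < PySem.List.pyGetD it 1 0 <;> simp [h0, h1, hq]

lemma portA_eq_map (items : List (List Int)) (queries : List Int) :
    maximumBeauty items queries = queries.map (fun q => pvG q items) := by
  unfold maximumBeauty
  apply List.map_congr_left
  intro q hq
  rw [itemLoop_getD items queries _ q hq,
      initD_getD queries PySem.Dict.empty (fun x => by simp) q]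
  rfl

-- ---------- B side ----------

lemma pvStep_comm (q : Int) : ∀ (c : Int) (a b : List Int),
    pvStep q (pvStep q c a) b = pvStep q (pvStep q c b) a := by
  intro c a b
  unfold pvStep
  split_ifs <;> omega

lemma pvG_perm (q : Int) {l l' : List (List Int)} (h : l.Perm l') : pvG q l = pvG q l' := by
  unfold pvG
  haveI : RightCommutative (pvStep q) := ⟨fun c a b => pvStep_comm q c a b⟩
  exact h.foldl_eq 0

-- binary-search invariant for the while-loop of Source B
lemma bsLoop_spec (prices : List Int) (q : Int)
    (hmono : ∀ i j, i ≤ j → j < prices.length → prices.getD i 0 ≤ prices.getD j 0) :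
    ∀ (n lo hi : Nat), hi - lo ≤ n → lo ≤ hi → hi ≤ prices.length →
    (∀ j, j < lo → prices.getD j 0 ≤ q) →
    (∀ j, hi ≤ j → j < prices.length → q < prices.getD j 0) →
    lo ≤ bsLoop prices q lo hi ∧ bsLoop prices q lo hi ≤ hi ∧
    (∀ j, j < bsLoop prices q lo hi → prices.getD j 0 ≤ q) ∧
    (∀ j, bsLoop prices q lo hi ≤ j → j < prices.length → q < prices.getD j 0) := by
  intro n
  induction n with
  | zero =>
      intro lo hi hn hle hhi hlow hup
      have : lo = hi := by omega
      subst this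
      rw [bsLoop]; simp only [lt_irrefl, if_false]
      exact ⟨le_refl _, le_refl _, hlow, hup⟩
  | succ m ih =>
      intro lo hi hn hle hhi hlow hup
      rw [bsLoop]
      by_cases hlt : lo < hi
      · rw [if_pos hlt]
        have hmidlt : (lo + hi) / 2 < hi := by omega
        have hmidge : lo ≤ (lo + hi) / 2 := by omega
        have hmidlen : (lo + hi) / 2 < prices.length := by omega
        have hget : PySem.List.pyGetD prices (((lo + hi) / 2 : Nat) : Int) 0
            = prices.getD ((lo + hi) / 2) 0 :=
          PySem.List.pyGetD_natCast prices ((lo + hi) / 2) 0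
        by_cases hc : PySem.List.pyGetD prices (((lo + hi) / 2 : Nat) : Int) 0 ≤ q
        · rw [if_pos hc]
          obtain ⟨h1, h2, h3, h4⟩ := ih ((lo + hi) / 2 + 1) hi (by omega) (by omega) hhi
            (by intro j hj
                have : prices.getD j 0 ≤ prices.getD ((lo + hi) / 2) 0 :=
                  hmono j _ (by omega) hmidlen
                rw [hget] at hc; omega)
            hup
          exact ⟨by omega, h2, h3, h4⟩
        · rw [if_neg hc]
          obtain ⟨h1, h2, h3, h4⟩ := ih lo ((lo + hi) / 2) (by omega) (by omega) (by omega) hlow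
            (by intro j hj hjlen
                have : prices.getD ((lo + hi) / 2) 0 ≤ prices.getD j 0 := hmono _ j hj hjlen
                rw [hget] at hc; omega)
          exact ⟨h1, by omega, h3, h4⟩
      · rw [if_neg hlt]
        have : lo = hi := by omega
        subst this
        exact ⟨le_refl _, le_refl _, hlow, hup⟩

-- pure prefix-max list and its link to the fold of the port
def pvPms (c : Int) : List (List Int) → List Int
  | [] => []
  | it :: t =>
      let c' := if c < PySem.List.pyGetD it 1 0 then PySem.List.pyGetD it 1 0 else c
      c' :: pvPms c' t

lemma bestFold_eq (l : List (List Int)) : ∀ (c : Int) (acc : List Int),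
    (l.foldl (fun (p : Int × List Int) it =>
      let cur := if p.1 < PySem.List.pyGetD it 1 0 then PySem.List.pyGetD it 1 0 else p.1
      (cur, p.2 ++ [cur])) (c, acc)).2 = acc ++ pvPms c l := by
  induction l with
  | nil => intro c acc; simp [pvPms]
  | cons it t ih =>
      intro c acc
      simp only [List.foldl_cons, pvPms]
      rw [ih]
      simp

lemma pvPms_length (l : List (List Int)) : ∀ c, (pvPms c l).length = l.length := by
  induction l with
  | nil => intro c; rfl
  | cons it t ih => intro c; simp [pvPms, ih]

lemma pvPms_getD (l : List (List Int)) : ∀ (c : Int) (k : Nat), k < l.length →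
    (pvPms c l).getD k 0
      = (l.take (k + 1)).foldl (fun c it => max c (PySem.List.pyGetD it 1 0)) c := by
  induction l with
  | nil => intro c k h; simp at h
  | cons it t ih =>
      intro c k h
      cases k with
      | zero =>
          simp [pvPms, max_def]
          split <;> split <;> omega
      | succ k' =>
          simp only [pvPms, List.getD_cons_succ, List.take_succ_cons, List.foldl_cons]
          rw [ih _ k' (by simpa using h)]
          congr 1
          simp [max_def]
          split <;> split <;> omega

-- pvG over an all-applicable prefix is the running max; over an inapplicable suffix it is the identity
lemma pvG_applicable (q : Int) (l : List (List Int)) (h : ∀ it ∈ l, PySem.List.pyGetD it 0 0 ≤ q) :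
    ∀ c, l.foldl (pvStep q) c = l.foldl (fun c it => max c (PySem.List.pyGetD it 1 0)) c := by
  induction l with
  | nil => intro c; rfl
  | cons it t ih =>
      intro c
      simp only [List.foldl_cons]
      have h0 : PySem.List.pyGetD it 0 0 ≤ q := h it (by simp)
      have : pvStep q c it = max c (PySem.List.pyGetD it 1 0) := by
        unfold pvStep; rw [max_def]; split <;> split <;> omega
      rw [this, ih (fun x hx => h x (by simp [hx]))]

lemma pvG_inapplicable (q : Int) (l : List (List Int)) (h : ∀ it ∈ l, q < PySem.List.pyGetD it 0 0) :
    ∀ c, l.foldl (pvStep q) c = c := by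
  induction l with
  | nil => intro c; rfl
  | cons it t ih =>
      intro c
      simp only [List.foldl_cons]
      have h0 : q < PySem.List.pyGetD it 0 0 := h it (by simp)
      have : pvStep q c it = c := by unfold pvStep; split <;> omega
      rw [this, ih (fun x hx => h x (by simp [hx]))]

lemma portB_eq_map (items : List (List Int)) (queries : List Int) :
    maximumBeauty_alt items queries = queries.map (fun q => pvG q items) := by
  unfold maximumBeauty_alt
  apply List.map_congr_left
  intro q _
  set si := PySem.List.sorted items (fun it => PySem.List.pyGetD it 0 0) with hsi
  set prices := si.map (fun it => PySem.List.pyGetD it 0 0) with hprices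
  have hlen : prices.length = si.length := by simp [hprices]
  have hmono : ∀ i j, i ≤ j → j < prices.length → prices.getD i 0 ≤ prices.getD j 0 := by
    intro i j hij hjlen
    have hilen : i < prices.length := by omega
    rw [List.getD_eq_getElem _ _ hilen, List.getD_eq_getElem _ _ hjlen]
    simp only [hprices, List.getElem_map]
    exact PySem.List.key_sorted_getElem_mono items (fun it => PySem.List.pyGetD it 0 0) hij (by
      have hj' : j < si.length := by omega
      simpa [hsi] using hj')
  have hspec := bsLoop_spec prices q hmono (prices.length) 0 prices.length
    (by omega) (by omega) (le_refl _) (by omega) (by intro j hj hjl; omega)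
  set r := bsLoop prices q 0 prices.length with hr
  obtain ⟨-, hrle, hbelow, habove⟩ := hspec
  have hpg : pvG q items = pvG q si := pvG_perm q (PySem.List.sorted_perm items _ false).symm
  have hsplit : si = si.take r ++ si.drop r := (List.take_append_drop r si).symm
  have happ : ∀ it ∈ si.take r, PySem.List.pyGetD it 0 0 ≤ q := by
    intro it hit
    obtain ⟨k, hk, hke⟩ := List.getElem_of_mem hit
    simp only [List.length_take] at hk
    have hk' : k < r := by omega
    have h2 := hbelow k hk'
    rw [List.getD_eq_getElem _ _ (by omega : k < prices.length)] at h2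
    simp only [hprices, List.getElem_map] at h2
    have hke' : it = si[k]'(by omega) := by rw [← hke]; exact List.getElem_take
    rw [hke']
    exact h2
  have hnapp : ∀ it ∈ si.drop r, q < PySem.List.pyGetD it 0 0 := by
    intro it hit
    obtain ⟨k, hk, hke⟩ := List.getElem_of_mem hit
    simp only [List.length_drop] at hk
    have h2 := habove (r + k) (by omega) (by omega)
    rw [List.getD_eq_getElem _ _ (by omega : r + k < prices.length)] at h2
    simp only [hprices, List.getElem_map] at h2
    have hke' : it = si[r + k]'(by omega) := by rw [← hke]; exact List.getElem_drop
    rw [hke']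
    exact h2
  have hGsi : pvG q si = (si.take r).foldl (fun c it => max c (PySem.List.pyGetD it 1 0)) 0 := by
    unfold pvG
    conv_lhs => rw [hsplit]
    rw [List.foldl_append, pvG_inapplicable q _ hnapp, pvG_applicable q _ happ]
  rw [bestFold_eq, List.nil_append]
  by_cases hrz : r > 0
  · rw [if_pos hrz]
    have hrlen : r - 1 < si.length := by omega
    have hcast : ((r : Int) - 1) = ((r - 1 : Nat) : Int) := by omega
    rw [hcast, PySem.List.pyGetD_natCast]
    rw [List.getD_eq_getElem _ _ (by rw [pvPms_length]; omega)]
    rw [← List.getD_eq_getElem _ 0, pvPms_getD si 0 (r - 1) hrlen]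
    have : r - 1 + 1 = r := by omega
    rw [this, hpg, hGsi]
  · rw [if_neg hrz]
    have : r = 0 := by omega
    rw [hpg, hGsi, this]
    simp

-- ===== VERDICT (by name: the statement is the Claim_ definition above) =====
theorem maximumBeauty_spec : Claim_equal_maximumBeauty := by
  intro items queries _ _
  unfold Spec_maximumBeauty
  rw [portA_eq_map, portB_eq_map]
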